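-- pv_equiv track=rewrite | github.com/deepeshgupta12/seo-content-generation-system | apps/api/src/seo_content_engine/services/content_plan_builder.py | _apply_priority_order
-- ===== SOURCE A (Python) =====
-- def _apply_priority_order(items: list[dict], priority_ids: list[str], id_key: str = "id") -> list[dict]:
--     priority_map = {value: index for index, value in enumerate(priority_ids)}
--     return sorted(
--         items,
--         key=lambda item: (
--             priority_map.get(item.get(id_key), 10_000),
--             item.get(id_key, ""),
--         ),
--     )
-- ===== SOURCE B (Python) =====
-- def _apply_priority_order(items: list[dict], priority_ids: list[str], id_key: str = "id") -> list[dict]: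
--     priority_map = {value: index for index, value in enumerate(priority_ids)}
--     buckets = {}
--     for item in items:
--         rank = priority_map.get(item.get(id_key), 10_000)
--         buckets[rank] = buckets.get(rank, []) + [item]
--     result = []
--     for rank in sorted(buckets):
--         result.extend(sorted(buckets[rank], key=lambda item: item.get(id_key, "")))
--     return result
-- ===== Notes on version B (the rewrite author's own statement) =====
-- stated objective: alternative
-- what changed: A does one stable sort of all items on the composite (priority rank, id) key; B makes a single bucketing pass keyed by rank, then emits buckets in ascending rank order with each bucket sorted by id only.
import Mathlib
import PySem

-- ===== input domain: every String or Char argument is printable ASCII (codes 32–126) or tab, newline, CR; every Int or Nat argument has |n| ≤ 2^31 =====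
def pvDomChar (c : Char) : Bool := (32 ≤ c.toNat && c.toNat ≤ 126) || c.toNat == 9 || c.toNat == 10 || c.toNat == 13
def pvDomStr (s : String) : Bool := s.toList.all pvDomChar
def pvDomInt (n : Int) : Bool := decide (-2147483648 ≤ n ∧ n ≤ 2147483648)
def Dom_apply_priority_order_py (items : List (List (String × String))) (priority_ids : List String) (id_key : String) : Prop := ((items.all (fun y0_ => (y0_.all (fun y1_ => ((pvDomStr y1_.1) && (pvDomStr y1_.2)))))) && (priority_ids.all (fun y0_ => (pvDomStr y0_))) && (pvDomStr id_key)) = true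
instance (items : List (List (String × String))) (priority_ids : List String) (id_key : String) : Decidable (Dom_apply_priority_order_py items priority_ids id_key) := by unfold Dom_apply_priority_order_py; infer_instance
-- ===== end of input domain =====

-- B replaces A's single composite-key sort by a one-pass bucketing on the priority rank followed by
-- emitting the buckets in ascending rank order, each bucket sorted by id (objective: alternative decomposition).

-- ===== PORT A =====
-- priority_map = {value: index for index, value in enumerate(priority_ids)}
def pvPriorityMap (priority_ids : List String) : PySem.Dict String Int :=
  (PySem.List.enumerate priority_ids).foldl (fun d p => d.insert p.2 p.1) (PySem.Dict.mk [])

-- priority_map.get(item.get(id_key), 10_000)  (a missing id never matches a string key of the map)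
def pvRank (pm : PySem.Dict String Int) (id_key : String) (it : List (String × String)) : Int :=
  match (PySem.Dict.mk it).get? id_key with
  | none => 10000
  | some v => pm.getD v 10000

def apply_priority_order_py (items : List (List (String × String))) (priority_ids : List String) (id_key : String) : List (List (String × String)) :=
  PySem.List.sorted2 items (pvRank (pvPriorityMap priority_ids) id_key)
    (fun it => (PySem.Dict.mk it).getD id_key "") false

-- ===== PORT B =====
-- for item in items: buckets[rank] = buckets.get(rank, []) + [item]
def pvBuckets (pm : PySem.Dict String Int) (id_key : String) (items : List (List (String × String))) : PySem.Dict Int (List (List (String × String))) :=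
  items.foldl (fun d it => d.insert (pvRank pm id_key it) (d.getD (pvRank pm id_key it) [] ++ [it])) (PySem.Dict.mk [])

-- for rank in sorted(buckets): result.extend(sorted(buckets[rank], key=lambda item: item.get(id_key, "")))
def pvEmit (id_key : String) (buckets : PySem.Dict Int (List (List (String × String)))) : List (List (String × String)) :=
  (PySem.List.sorted buckets.keys (fun r => r) false).foldl
    (fun acc r => acc ++ PySem.List.sorted (buckets.getD r []) (fun it => (PySem.Dict.mk it).getD id_key "") false) []

def apply_priority_order_py_alt (items : List (List (String × String))) (priority_ids : List String) (id_key : String) : List (List (String × String)) :=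
  pvEmit id_key (pvBuckets (pvPriorityMap priority_ids) id_key items)

-- ===== PRECONDITION & SPEC =====
def Spec_apply_priority_order_py (items : List (List (String × String))) (priority_ids : List String) (id_key : String) (out : List (List (String × String))) : Prop := out = apply_priority_order_py_alt items priority_ids id_key
instance (items : List (List (String × String))) (priority_ids : List String) (id_key : String) (out : List (List (String × String))) : Decidable (Spec_apply_priority_order_py items priority_ids id_key out) := by unfold Spec_apply_priority_order_py; infer_instance

-- ===== CLAIM (what is proved, stated in full; the proofs are below) =====
def Claim_equal_apply_priority_order_py : Prop := ∀ (items : List (List (String × String))) (priority_ids : List String) (id_key : String), Dom_apply_priority_order_py items priority_ids id_key → Spec_apply_priority_order_py items priority_ids id_key (apply_priority_order_py items priority_ids id_key)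

-- ===== LEMMAS AND PROOFS =====

-- insertBy into a list whose every element triggers the comparison: x goes in front.
theorem pv_insertBy_all_true {α : Type} (b : α → α → Bool) (x : α) (v : List α)
    (h : ∀ y ∈ v, b x y = true) : PySem.List.insertBy b x v = x :: v := by
  cases v with
  | nil => rfl
  | cons y ys =>
      show (if b x y then x :: y :: ys else y :: PySem.List.insertBy b x ys) = x :: y :: ys
      rw [h y (by simp)]; rfl

-- insertBy skips a prefix on which the comparison is false.
theorem pv_insertBy_append_not {α : Type} (b : α → α → Bool) (x : α) (u v : List α)
    (h : ∀ y ∈ u, b x y = false) :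
    PySem.List.insertBy b x (u ++ v) = u ++ PySem.List.insertBy b x v := by
  induction u with
  | nil => rfl
  | cons z zs ih =>
      show (if b x z then x :: (z :: zs ++ v) else z :: PySem.List.insertBy b x (zs ++ v)) = _
      rw [h z (by simp), ih (fun y hy => h y (by simp [hy]))]
      rfl

-- insertBy into m ++ v where b agrees with b' on m and is true throughout v.
theorem pv_insertBy_congr_append {α : Type} (b b' : α → α → Bool) (x : α) (m v : List α)
    (hm : ∀ y ∈ m, b x y = b' x y) (hv : ∀ y ∈ v, b x y = true) :
    PySem.List.insertBy b x (m ++ v) = PySem.List.insertBy b' x m ++ v := by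
  induction m with
  | nil =>
      simp only [List.nil_append]
      rw [pv_insertBy_all_true b x v hv]; rfl
  | cons z zs ih =>
      have hz : b x z = b' x z := hm z (by simp)
      show (if b x z then x :: (z :: (zs ++ v)) else z :: PySem.List.insertBy b x (zs ++ v))
          = (if b' x z then x :: z :: zs else z :: PySem.List.insertBy b' x zs) ++ v
      rw [hz]
      by_cases hb : b' x z = true
      · rw [if_pos hb, if_pos hb]; simp
      · rw [Bool.not_eq_true] at hb
        rw [if_neg (by simp [hb]), if_neg (by simp [hb]), ih (fun y hy => hm y (by simp [hy]))]
        rfl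

theorem pv_flatMap_congr {α β : Type} (l : List α) (F G : α → List β)
    (h : ∀ r ∈ l, F r = G r) : l.flatMap F = l.flatMap G := by
  induction l with
  | nil => rfl
  | cons z zs ih =>
      simp only [List.flatMap_cons]
      rw [h z (by simp), ih (fun r hr => h r (by simp [hr]))]

-- sorted of a snoc is an insertion into the sorted prefix.
theorem pv_sorted_snoc {α κ : Type} [LT κ] [DecidableLT κ] (xs : List α) (x : α) (key : α → κ) :
    PySem.List.sorted (xs ++ [x]) key false
      = PySem.List.insertBy (fun a b => decide (key a < key b)) x (PySem.List.sorted xs key false) := by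
  rw [PySem.List.sorted_eq_foldl_insertBy, PySem.List.sorted_eq_foldl_insertBy, List.foldl_append]
  rfl

theorem pv_sorted2_snoc {α κ₁ κ₂ : Type} [LT κ₁] [DecidableLT κ₁] [LT κ₂] [DecidableLT κ₂]
    (xs : List α) (x : α) (k1 : α → κ₁) (k2 : α → κ₂) :
    PySem.List.sorted2 (xs ++ [x]) k1 k2 false
      = PySem.List.insertBy
          (fun a b => decide (k1 a < k1 b) || (!decide (k1 b < k1 a) && decide (k2 a < k2 b)))
          x (PySem.List.sorted2 xs k1 k2 false) := by
  show List.foldl _ [] (xs ++ [x]) = _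
  rw [List.foldl_append]
  rfl

theorem pv_sorted_singleton {α κ : Type} [LT κ] [DecidableLT κ] (x : α) (key : α → κ) :
    PySem.List.sorted [x] key false = [x] := rfl

-- dedup of a snoc.
theorem pv_dedup_snoc {α : Type} [BEq α] [LawfulBEq α] [DecidableEq α] (l : List α) (v : α) :
    PySem.List.dedup (l ++ [v])
      = if v ∈ l then PySem.List.dedup l else PySem.List.dedup l ++ [v] := by
  rw [PySem.List.dedup_eq_ofList, PySem.List.dedup_eq_ofList]
  show List.foldl PySem.Set.add PySem.Set.empty (l ++ [v]) = _
  rw [List.foldl_append]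
  show PySem.Set.add (PySem.Set.ofList l) v = _
  unfold PySem.Set.add
  by_cases hv : v ∈ l
  · rw [if_pos hv, if_pos]
    simp only [PySem.Set.contains, List.contains_eq_mem, decide_eq_true_eq]
    exact (PySem.Set.mem_ofList l v).mpr hv
  · rw [if_neg hv, if_neg]
    simp only [PySem.Set.contains, List.contains_eq_mem, decide_eq_true_eq]
    exact fun hm => hv ((PySem.Set.mem_ofList l v).mp hm)

-- split a strictly increasing Int list around a value not in it
theorem pv_split_lt (K : List Int) (hK : K.Pairwise (· < ·)) (v : Int) (hv : v ∉ K) :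
    ∃ s t, K = s ++ t ∧ (∀ y ∈ s, y < v) ∧ (∀ y ∈ t, v < y) := by
  induction K with
  | nil => exact ⟨[], [], rfl, by simp, by simp⟩
  | cons k K' ih =>
      have hpk : ∀ y ∈ K', k < y := (List.pairwise_cons.mp hK).1
      have hK' : K'.Pairwise (· < ·) := (List.pairwise_cons.mp hK).2
      have hkv : k ≠ v := fun h => hv (h ▸ List.mem_cons_self)
      by_cases hlt : k < v
      · obtain ⟨s, t, hst, hs, ht⟩ := ih hK' (fun h => hv (List.mem_cons_of_mem _ h))
        exact ⟨k :: s, t, by rw [hst]; rfl,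
          fun y hy => by
            rcases List.mem_cons.mp hy with h | h
            · exact h ▸ hlt
            · exact hs y h,
          ht⟩
      · have hvk : v < k := by omega
        exact ⟨[], k :: K', rfl, by simp,
          fun y hy => by
            rcases List.mem_cons.mp hy with h | h
            · exact h ▸ hvk
            · exact lt_trans hvk (hpk y h)⟩

-- members of a sorted bucket have the bucket's rank
theorem pv_mem_bucket {α : Type} (f : α → Int) (g : α → String) (xs : List α) (r : Int) (y : α)
    (hy : y ∈ PySem.List.sorted (xs.filter (fun z => f z == r)) g false) : f y = r := by
  have := (PySem.List.mem_sorted _ _ _ _).mp hy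
  have := List.of_mem_filter this
  simpa using this

-- MAIN: a stable sort on the lexicographic (rank, id) key equals the buckets-by-rank
-- (in ascending rank order), each bucket sorted by id.
theorem pv_main {α : Type} (f : α → Int) (g : α → String) (xs : List α) :
    PySem.List.sorted2 xs f g false
      = (PySem.List.sorted (PySem.List.dedup (xs.map f)) (fun r => r) false).flatMap
          (fun r => PySem.List.sorted (xs.filter (fun y => f y == r)) g false) := by
  induction xs using List.reverseRecOn with
  | nil => rfl
  | append_singleton xs x ih =>
      have hP : (PySem.List.sorted (PySem.List.dedup (xs.map f)) (fun r => r) false).Pairwise (· < ·) := by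
        rw [PySem.List.dedup_eq_ofList]
        exact PySem.List.sorted_ofList_pairwise_lt _
      set K := PySem.List.sorted (PySem.List.dedup (xs.map f)) (fun r => r) false with hKdef
      set F := fun r => PySem.List.sorted (xs.filter (fun y => f y == r)) g false with hFdef
      set F' := fun r => PySem.List.sorted ((xs ++ [x]).filter (fun y => f y == r)) g false with hF'def
      have hmap : (xs ++ [x]).map f = xs.map f ++ [f x] := by simp
      have hF'ne : ∀ r, r ≠ f x → F' r = F r := by
        intro r hr
        simp only [hF'def, hFdef, List.filter_append]
        have hxr : f x ≠ r := fun h => hr h.symm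
        have : List.filter (fun y => f y == r) [x] = [] := by
          simp [hxr]
        rw [this, List.append_nil]
      have hF'fx : F' (f x)
          = PySem.List.insertBy (fun a b => decide (g a < g b)) x (F (f x)) := by
        simp only [hF'def, hFdef, List.filter_append]
        have : List.filter (fun y => f y == f x) [x] = [x] := by simp
        rw [this, pv_sorted_snoc]
      rw [pv_sorted2_snoc, ih, hmap]
      by_cases hmem : f x ∈ xs.map f
      · -- the rank already exists: x is inserted into its bucket
        have hK' : PySem.List.dedup (xs.map f ++ [f x]) = PySem.List.dedup (xs.map f) := by
          rw [pv_dedup_snoc, if_pos hmem]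
        rw [hK', ← hKdef]
        have hfxK : f x ∈ K := by
          rw [hKdef, PySem.List.mem_sorted]
          exact (PySem.List.mem_dedup _ _).mpr hmem
        obtain ⟨s, t, hst⟩ := List.append_of_mem hfxK
        have hPst : (s ++ f x :: t).Pairwise (· < ·) := hst ▸ hP
        have hs_lt : ∀ y ∈ s, y < f x := by
          intro y hy
          exact (List.pairwise_append.mp hPst).2.2 y hy (f x) List.mem_cons_self
        have ht_gt : ∀ y ∈ t, f x < y := by
          intro y hy
          exact (List.pairwise_cons.mp (List.pairwise_append.mp hPst).2.1).1 y hy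
        rw [hst]
        simp only [List.flatMap_append, List.flatMap_cons]
        rw [pv_insertBy_append_not _ x (s.flatMap F) _ ?hu]
        case hu =>
          intro y hy
          obtain ⟨r, hr, hyr⟩ := List.mem_flatMap.mp hy
          have hfy : f y = r := pv_mem_bucket f g xs r y hyr
          have e1 : decide (f x < f y) = false := decide_eq_false (by have := hs_lt r hr; omega)
          have e2 : decide (f y < f x) = true := decide_eq_true (by have := hs_lt r hr; omega)
          rw [e1, e2]; rfl
        rw [pv_insertBy_congr_append _ (fun a b => decide (g a < g b)) x (F (f x)) (t.flatMap F) ?hm ?hv]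
        case hm =>
          intro y hy
          have hfy : f y = f x := pv_mem_bucket f g xs (f x) y hy
          have e1 : decide (f x < f y) = false := decide_eq_false (by omega)
          have e2 : decide (f y < f x) = false := decide_eq_false (by omega)
          rw [e1, e2]; rfl
        case hv =>
          intro y hy
          obtain ⟨r, hr, hyr⟩ := List.mem_flatMap.mp hy
          have hfy : f y = r := pv_mem_bucket f g xs r y hyr
          have e1 : decide (f x < f y) = true := decide_eq_true (by have := ht_gt r hr; omega)
          rw [e1]; rfl
        rw [pv_flatMap_congr s F' F (fun r hr => hF'ne r (by have := hs_lt r hr; omega)),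
            pv_flatMap_congr t F' F (fun r hr => hF'ne r (by have := ht_gt r hr; omega)),
            hF'fx]
      · -- a new rank: x forms a fresh singleton bucket between smaller and larger ranks
        have hK' : PySem.List.dedup (xs.map f ++ [f x]) = PySem.List.dedup (xs.map f) ++ [f x] := by
          rw [pv_dedup_snoc, if_neg hmem]
        rw [hK', pv_sorted_snoc, ← hKdef]
        have hfxK : f x ∉ K := by
          rw [hKdef, PySem.List.mem_sorted]
          exact fun h => hmem ((PySem.List.mem_dedup _ _).mp h)
        obtain ⟨s, t, hst, hs_lt, ht_gt⟩ := pv_split_lt K hP (f x) hfxK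
        rw [hst]
        rw [pv_insertBy_append_not _ (f x) s t
              (fun y hy => decide_eq_false (by have := hs_lt y hy; omega)),
            pv_insertBy_all_true _ (f x) t
              (fun y hy => decide_eq_true (ht_gt y hy))]
        simp only [List.flatMap_append, List.flatMap_cons]
        rw [pv_insertBy_append_not _ x (s.flatMap F) (t.flatMap F) ?hu2]
        case hu2 =>
          intro y hy
          obtain ⟨r, hr, hyr⟩ := List.mem_flatMap.mp hy
          have hfy : f y = r := pv_mem_bucket f g xs r y hyr
          have e1 : decide (f x < f y) = false := decide_eq_false (by have := hs_lt r hr; omega)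
          have e2 : decide (f y < f x) = true := decide_eq_true (by have := hs_lt r hr; omega)
          rw [e1, e2]; rfl
        rw [pv_insertBy_all_true _ x (t.flatMap F) ?hv2]
        case hv2 =>
          intro y hy
          obtain ⟨r, hr, hyr⟩ := List.mem_flatMap.mp hy
          have hfy : f y = r := pv_mem_bucket f g xs r y hyr
          have e1 : decide (f x < f y) = true := decide_eq_true (by have := ht_gt r hr; omega)
          rw [e1]; rfl
        have hfilter : xs.filter (fun y => f y == f x) = [] := by
          rw [List.filter_eq_nil_iff]
          intro y hy
          simp only [beq_iff_eq]
          intro h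
          exact hmem (h ▸ List.mem_map_of_mem hy)
        have hF'fx2 : F' (f x) = [x] := by
          simp only [hF'def, List.filter_append, hfilter, List.nil_append]
          have : List.filter (fun y => f y == f x) [x] = [x] := by simp
          rw [this, pv_sorted_singleton]
        rw [pv_flatMap_congr s F' F (fun r hr => hF'ne r (by have := hs_lt r hr; omega)),
            pv_flatMap_congr t F' F (fun r hr => hF'ne r (by have := ht_gt r hr; omega)),
            hF'fx2]
        simp

-- ===== Dict bucket bookkeeping =====

theorem pv_contains_iff {ν : Type} (d : PySem.Dict Int ν) (k : Int) :
    d.contains k = true ↔ k ∈ d.keys := by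
  simp only [PySem.Dict.contains, PySem.Dict.keys, List.any_eq_true, List.mem_map, beq_iff_eq]

theorem pv_keys_insert {ν : Type} (d : PySem.Dict Int ν) (k : Int) (v : ν) :
    (d.insert k v).keys = if d.contains k then d.keys else d.keys ++ [k] := by
  unfold PySem.Dict.insert PySem.Dict.keys
  by_cases hc : d.contains k = true
  · rw [if_pos hc, if_pos hc]
    simp only [List.map_map]
    apply List.map_congr_left
    intro p _
    by_cases hp : (p.1 == k) = true
    · simp only [Function.comp, hp, if_pos]
      exact (eq_of_beq hp).symm
    · rw [Bool.not_eq_true] at hp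
      simp [Function.comp, hp]
  · rw [if_neg hc, if_neg hc]
    simp

theorem pv_bucket_inv (pm : PySem.Dict String Int) (id_key : String)
    (items : List (List (String × String))) :
    (pvBuckets pm id_key items).keys = PySem.List.dedup (items.map (pvRank pm id_key))
    ∧ ∀ r, (pvBuckets pm id_key items).getD r []
        = items.filter (fun y => pvRank pm id_key y == r) := by
  induction items using List.reverseRecOn with
  | nil => exact ⟨rfl, fun r => rfl⟩
  | append_singleton items x ih =>
      obtain ⟨ih1, ih2⟩ := ih
      have hstep : pvBuckets pm id_key (items ++ [x])
          = (pvBuckets pm id_key items).insert (pvRank pm id_key x)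
              ((pvBuckets pm id_key items).getD (pvRank pm id_key x) [] ++ [x]) := by
        unfold pvBuckets
        rw [List.foldl_append]
        rfl
      constructor
      · rw [hstep, pv_keys_insert]
        simp only [List.map_append, List.map_cons, List.map_nil]
        rw [pv_dedup_snoc]
        by_cases hmem : pvRank pm id_key x ∈ items.map (pvRank pm id_key)
        · have hc : (pvBuckets pm id_key items).contains (pvRank pm id_key x) = true := by
            rw [pv_contains_iff, ih1]
            exact (PySem.List.mem_dedup _ _).mpr hmem
          rw [if_pos hmem, hc, if_pos rfl, ih1]
        · have hc : (pvBuckets pm id_key items).contains (pvRank pm id_key x) = false := by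
            rw [← Bool.not_eq_true, pv_contains_iff, ih1]
            exact fun h => hmem ((PySem.List.mem_dedup _ _).mp h)
          rw [if_neg hmem, hc, if_neg (by simp), ih1]
      · intro r
        rw [hstep, PySem.Dict.getD_insert, List.filter_append]
        by_cases hr : r = pvRank pm id_key x
        · rw [if_pos hr, ih2]
          have : List.filter (fun y => pvRank pm id_key y == r) [x] = [x] := by
            simp [hr]
          rw [this, hr]
        · rw [if_neg hr, ih2]
          have hxr : pvRank pm id_key x ≠ r := fun h => hr h.symm
          have : List.filter (fun y => pvRank pm id_key y == r) [x] = [] := by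
            simp [hxr]
          rw [this, List.append_nil]

theorem pv_alt_eq (items : List (List (String × String))) (priority_ids : List String) (id_key : String) :
    apply_priority_order_py_alt items priority_ids id_key
      = (PySem.List.sorted (PySem.List.dedup (items.map (pvRank (pvPriorityMap priority_ids) id_key))) (fun r => r) false).flatMap
          (fun r => PySem.List.sorted (items.filter (fun y => pvRank (pvPriorityMap priority_ids) id_key y == r))
              (fun it => (PySem.Dict.mk it).getD id_key "") false) := by
  obtain ⟨h1, h2⟩ := pv_bucket_inv (pvPriorityMap priority_ids) id_key items
  unfold apply_priority_order_py_alt pvEmit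
  rw [h1, PySem.List.foldl_append_eq_flatMap, List.nil_append]
  apply pv_flatMap_congr
  intro r _
  rw [h2 r]

-- ===== VERDICT (by name: the statement is the Claim_ definition above) =====
theorem apply_priority_order_py_spec : Claim_equal_apply_priority_order_py := by
  intro items priority_ids id_key _
  unfold Spec_apply_priority_order_py
  rw [pv_alt_eq]
  unfold apply_priority_order_py
  exact pv_main _ _ items
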